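-- pv_equiv track=rewrite | github.com/f1r3k3rn/codeforces | contests/hello2025/B.py | solve
-- ===== SOURCE A (Python) =====
-- from collections import defaultdict
--
-- def solve(n, k , vet):
--     m = vet[n - 1]
--     sol = 1
--     s = defaultdict(int)
--
--     for i in vet:
--         s[i] += 1
--
--     g = [s[i] for i in s.keys()]
--     g.sort()
--     sol = len(s)
--     for i in g:
--         if i <= k:
--             k -= i
--             sol -= 1
--             sol = max(sol, 1)
--
--     return sol
-- ===== SOURCE B (Python) =====
-- def solve(n, k, vet):
--     freq = {}
--     for x in vet:
--         freq[x] = freq.get(x, 0) + 1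
--     sizes = {}
--     for c in freq.values():
--         sizes[c] = sizes.get(c, 0) + 1
--     distinct = len(freq)
--     removed = 0
--     for s in range(1, len(vet) + 1):
--         if k < s:
--             break
--         c = sizes.get(s, 0)
--         if c:
--             take = min(c, k // s)
--             k -= take * s
--             removed += take
--             if take < c:
--                 break
--     return max(distinct - removed, 1)
-- ===== Notes on version B (the rewrite author's own statement) =====
-- stated objective: alternative
-- what changed: A sorts the list of group sizes and removes groups one at a time in a greedy loop; B never sorts: it builds a size-histogram dict and sweeps sizes s = 1..len(vet), removing whole buckets at once with take = min(cnt[s], k // s) and stopping at the first partial bucket.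
import Mathlib
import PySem

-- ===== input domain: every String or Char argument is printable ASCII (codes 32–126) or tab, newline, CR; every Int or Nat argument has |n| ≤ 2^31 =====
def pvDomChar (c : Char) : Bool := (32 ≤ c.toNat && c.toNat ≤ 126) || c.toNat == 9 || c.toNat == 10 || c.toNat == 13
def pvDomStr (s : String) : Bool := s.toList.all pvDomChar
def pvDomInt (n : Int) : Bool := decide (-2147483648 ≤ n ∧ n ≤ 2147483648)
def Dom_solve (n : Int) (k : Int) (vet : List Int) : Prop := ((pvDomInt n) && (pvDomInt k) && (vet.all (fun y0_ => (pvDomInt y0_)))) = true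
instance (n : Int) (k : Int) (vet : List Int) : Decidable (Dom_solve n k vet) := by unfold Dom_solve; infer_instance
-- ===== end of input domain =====

-- B replaces A's sort-the-group-sizes-and-remove-one-by-one greedy by a counting-sort style
-- bucket sweep over sizes 1..len(vet) that removes whole buckets with min(cnt, k // s) at once.

-- ===== PORT A =====
def solve (n : Int) (k : Int) (vet : List Int) : Int :=
  match PySem.List.pyGet? vet (n - 1) with
  | none => 0  -- IndexError in Python; excluded by Pre_solve
  | some _m =>
    let s := vet.foldl (fun d i => d.insert i (d.getD i 0 + 1)) (PySem.Dict.empty : PySem.Dict Int Int)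
    let g := PySem.List.sorted (s.keys.map (fun i => s.getD i 0)) (fun x => x)
    let sol : Int := (s.size : Int)
    let r := g.foldl (fun (p : Int × Int) i => if i ≤ p.1 then (p.1 - i, max (p.2 - 1) 1) else p) (k, sol)
    r.2

-- ===== PORT B =====
-- the `for s in range(1, len(vet)+1)` loop of Source B, with its two `break`s
def solveAltLoop (sizes : PySem.Dict Int Int) : List Int → Int → Int → Int
  | [], _k, removed => removed
  | s :: rest, k, removed =>
    if k < s then removed
    else
      let c := sizes.getD s 0
      if c ≠ 0 then
        let take := min c (PySem.Int.floordiv k s)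
        if take < c then removed + take
        else solveAltLoop sizes rest (k - take * s) (removed + take)
      else solveAltLoop sizes rest k removed

def solve_alt (n : Int) (k : Int) (vet : List Int) : Int :=
  let freq := vet.foldl (fun d x => d.insert x (d.getD x 0 + 1)) (PySem.Dict.empty : PySem.Dict Int Int)
  let sizes := freq.values.foldl (fun d c => d.insert c (d.getD c 0 + 1)) (PySem.Dict.empty : PySem.Dict Int Int)
  let removed := solveAltLoop sizes (PySem.List.pyRange 1 ((vet.length : Int) + 1)) k 0
  max ((freq.size : Int) - removed) 1

-- ===== PRECONDITION & SPEC =====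
-- Pre_solve excludes exactly the inputs on which A's `vet[n-1]` raises IndexError.
def Pre_solve (n : Int) (k : Int) (vet : List Int) : Prop :=
  -(vet.length : Int) ≤ n - 1 ∧ n - 1 < (vet.length : Int)
instance (n : Int) (k : Int) (vet : List Int) : Decidable (Pre_solve n k vet) := by unfold Pre_solve; infer_instance

def pvWitness_solve : Int × Int × List Int := (1, 0, [5])

def Spec_solve (n : Int) (k : Int) (vet : List Int) (out : Int) : Prop := out = solve_alt n k vet
instance (n : Int) (k : Int) (vet : List Int) (out : Int) : Decidable (Spec_solve n k vet out) := by unfold Spec_solve; infer_instance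

-- ===== CLAIM (what is proved, stated in full; the proofs are below) =====
def Claim_equal_solve : Prop := ∀ (n : Int) (k : Int) (vet : List Int), Dom_solve n k vet → Pre_solve n k vet → Spec_solve n k vet (solve n k vet)

-- ===== LEMMAS AND PROOFS =====

-- number of groups A's greedy loop removes, given the (sorted) list of group sizes and budget k
def greedyR : List Int → Int → Int
  | [], _ => 0
  | c :: t, k => if c ≤ k then 1 + greedyR t (k - c) else greedyR t k

lemma greedyR_nonneg : ∀ (l : List Int) (k : Int), 0 ≤ greedyR l k := by
  intro l
  induction l with
  | nil => intro k; simp [greedyR]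
  | cons c t ih =>
    intro k
    simp only [greedyR]
    split
    · have := ih (k - c); omega
    · exact ih k

lemma greedyR_le_length : ∀ (l : List Int) (k : Int), greedyR l k ≤ (l.length : Int) := by
  intro l
  induction l with
  | nil => intro k; simp [greedyR]
  | cons c t ih =>
    intro k
    simp only [greedyR, List.length_cons]
    split
    · have := ih (k - c); push_cast; omega
    · have := ih k; push_cast; omega

lemma greedyR_zero : ∀ (l : List Int) (k : Int), (∀ x ∈ l, k < x) → greedyR l k = 0 := by
  intro l
  induction l with
  | nil => intro k _; simp [greedyR]
  | cons c t ih =>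
    intro k h
    have hc : k < c := h c (by simp)
    simp only [greedyR, if_neg (by omega : ¬ c ≤ k)]
    exact ih k (fun x hx => h x (by simp [hx]))

-- A's loop: sol after the fold is max (d - removed) 1
lemma foldA (g : List Int) : ∀ (k d : Int), (g.length : Int) ≤ d → 1 ≤ d →
    (g.foldl (fun (p : Int × Int) i => if i ≤ p.1 then (p.1 - i, max (p.2 - 1) 1) else p) (k, d)).2
      = max (d - greedyR g k) 1 := by
  induction g with
  | nil => intro k d _ h1; simp [greedyR]; omega
  | cons c t ih =>
    intro k d hlen h1
    simp only [List.length_cons] at hlen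
    push_cast at hlen
    simp only [List.foldl_cons]
    by_cases hc : c ≤ k
    · rw [if_pos hc]
      have h2 : (t.length : Int) ≤ max (d - 1) 1 := by omega
      rw [ih (k - c) (max (d - 1) 1) h2 (le_max_right _ _)]
      have hR0 := greedyR_nonneg t (k - c)
      have hRl := greedyR_le_length t (k - c)
      simp only [greedyR, if_pos hc]
      omega
    · rw [if_neg hc, ih k d (by omega) h1]
      simp [greedyR, hc]

lemma greedyR_replicate (s : Int) (hs : 0 < s) :
    ∀ (m : Nat) (rest : List Int) (k : Int), (m : Int) * s ≤ k →
      greedyR (List.replicate m s ++ rest) k = (m : Int) + greedyR rest (k - (m : Int) * s) := by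
  intro m
  induction m with
  | zero => intro rest k _; simp
  | succ m ih =>
    intro rest k h
    have hms : (0 : Int) ≤ (m : Int) * s := mul_nonneg (Int.natCast_nonneg m) hs.le
    have hexp : ((m : Int) + 1) * s = (m : Int) * s + s := by ring
    push_cast at h
    have hsk : s ≤ k := by omega
    rw [List.replicate_succ, List.cons_append]
    simp only [greedyR, if_pos hsk]
    rw [ih rest (k - s) (by omega)]
    have : k - s - (m : Int) * s = k - ((m : Int) + 1) * s := by ring
    rw [this]
    push_cast
    ring

-- a ≤-sorted list splits its ≥s part into the s-block followed by the ≥s+1 part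
lemma sorted_filter_split (s : Int) : ∀ (l : List Int), l.Pairwise (· ≤ ·) →
    l.filter (fun x => decide (s ≤ x)) =
      List.replicate (l.count s) s ++ l.filter (fun x => decide (s + 1 ≤ x)) := by
  intro l
  induction l with
  | nil => intro _; simp
  | cons a t ih =>
    intro hp
    rw [List.pairwise_cons] at hp
    obtain ⟨hall, hpt⟩ := hp
    rcases lt_trichotomy a s with h | h | h
    · rw [List.filter_cons_of_neg (by simp; omega), List.filter_cons_of_neg (by simp; omega),
          List.count_cons_of_ne (by omega)]
      exact ih hpt
    · subst h
      rw [List.filter_cons_of_pos (by simp), List.filter_cons_of_neg (by simp),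
          List.count_cons_self, List.replicate_succ, List.cons_append]
      rw [ih hpt]
    · have hmem : ∀ x ∈ a :: t, s + 1 ≤ x := by
        intro x hx
        rcases List.mem_cons.mp hx with rfl | hx
        · omega
        · have := hall x hx; omega
      have h1 : (a :: t).filter (fun x => decide (s ≤ x)) = a :: t :=
        List.filter_eq_self.mpr (fun x hx => by have := hmem x hx; simp; omega)
      have h2 : (a :: t).filter (fun x => decide (s + 1 ≤ x)) = a :: t :=
        List.filter_eq_self.mpr (fun x hx => by have := hmem x hx; simp; omega)
      have h3 : (a :: t).count s = 0 := by
        rw [List.count_eq_zero]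
        intro hmem'
        have := hmem s hmem'; omega
      rw [h1, h2, h3]
      simp

-- B's bucket sweep computes exactly A's greedy removal count on the sorted size list
lemma coreLoop (sizes : PySem.Dict Int Int) (g : List Int) (N : Int)
    (hcnt : ∀ t : Int, sizes.getD t 0 = (g.count t : Int))
    (hsorted : g.Pairwise (· ≤ ·))
    (hmem : ∀ x ∈ g, 1 ≤ x ∧ x ≤ N) :
    ∀ (fuel : Nat) (s k r : Int), 1 ≤ s → s + (fuel : Int) = N + 1 →
      solveAltLoop sizes (PySem.List.pyRange s (N + 1)) k r
        = r + greedyR (g.filter (fun x => decide (s ≤ x))) k := by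
  intro fuel
  induction fuel with
  | zero =>
    intro s k r hs1 hsN
    have hends : N + 1 ≤ s := by push_cast at hsN; omega
    rw [PySem.List.pyRange_one_eq_nil hends]
    have : g.filter (fun x => decide (s ≤ x)) = [] := by
      rw [List.filter_eq_nil_iff]
      intro x hx
      have := (hmem x hx).2
      simp; omega
    rw [this]
    simp [solveAltLoop, greedyR]
  | succ fuel ih =>
    intro s k r hs1 hsN
    push_cast at hsN
    have hsN' : s < N + 1 := by omega
    rw [PySem.List.pyRange_one_cons hsN']
    simp only [solveAltLoop]
    have hsplit := sorted_filter_split s g hsorted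
    by_cases hks : k < s
    · rw [if_pos hks]
      rw [greedyR_zero _ k (by
        intro x hx
        rw [List.mem_filter] at hx
        have := hx.2
        simp at this
        omega)]
      ring
    · rw [if_neg hks]
      have hs0 : (0 : Int) < s := by omega
      have hkk : s ≤ k := by omega
      have hcnts := hcnt s
      set c := sizes.getD s 0 with hc
      set m := g.count s with hmdef
      -- floor division facts
      have hq : PySem.Int.floordiv k s = k / s := PySem.Int.floordiv_eq_ediv_of_pos hs0
      set q := k / s with hqdef
      have hdm : s * (k / s) + k % s = k := Int.mul_ediv_add_emod k s
      have hr0 : 0 ≤ k % s := Int.emod_nonneg k (by omega)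
      have hrs : k % s < s := Int.emod_lt_of_pos k hs0
      have hq1 : 1 ≤ q := by nlinarith [hdm, hr0, hrs]
      have hqs : q * s ≤ k := by nlinarith [hdm, hr0]
      by_cases hc0 : c ≠ 0
      · rw [if_pos hc0]
        rw [hq]
        by_cases hbr : min c q < c
        · -- break: only q groups of size s fit, nothing later fits
          rw [if_pos hbr]
          have hqc : q < c := by omega
          have hmin : min c q = q := min_eq_right (by omega)
          rw [hmin]
          rw [hsplit]
          have hqm : q.toNat ≤ m := by omega
          have hrep : List.replicate m s = List.replicate q.toNat s ++ List.replicate (m - q.toNat) s := by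
            rw [← List.replicate_add, Nat.add_sub_cancel' hqm]
          rw [hrep, List.append_assoc]
          rw [greedyR_replicate s hs0 q.toNat _ k (by rw [Int.toNat_of_nonneg (by omega)]; exact hqs)]
          rw [Int.toNat_of_nonneg (by omega)]
          have hqs' : q * s = s * (k / s) := by rw [hqdef]; ring
          have hk' : k - q * s = k % s := by omega
          rw [hk']
          rw [greedyR_zero _ _ (by
            intro x hx
            rcases List.mem_append.mp hx with hx | hx
            · rw [List.eq_of_mem_replicate hx]; omega
            · rw [List.mem_filter] at hx
              have := hx.2; simp at this; omega)]
          ring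
        · -- whole bucket affordable: take all m groups of size s, continue
          rw [if_neg hbr]
          have hcq : c ≤ q := by omega
          have hmin : min c q = c := min_eq_left (by omega)
          rw [hmin]
          have hms : c * s ≤ k := by nlinarith [hqs, hcq, hs0]
          rw [ih (s + 1) (k - c * s) (r + c) (by omega) (by omega)]
          rw [hsplit]
          rw [hcnts] at hms ⊢
          rw [greedyR_replicate s hs0 m _ k hms]
          ring
      · rw [if_neg hc0]
        have hm0 : m = 0 := by omega
        rw [ih (s + 1) k r (by omega) (by omega)]
        rw [hsplit, hm0]
        simp

-- ===== VERDICT (by name: the statement is the Claim_ definition above) =====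
theorem solve_spec : Claim_equal_solve := by
  unfold Claim_equal_solve
  intro n k vet _hdom hpre
  unfold Spec_solve
  unfold Pre_solve at hpre
  obtain ⟨m, hm⟩ : ∃ m, PySem.List.pyGet? vet (n - 1) = some m := by
    rcases h : PySem.List.pyGet? vet (n - 1) with _ | m
    · rw [PySem.List.pyGet?_eq_none_iff] at h
      exact absurd (by exact ⟨hpre.1, hpre.2⟩ : PySem.Raise.InRange vet.length (n - 1)) h
    · exact ⟨m, rfl⟩
  have hlen0 : 0 < vet.length := by omega
  simp only [solve, solve_alt, hm, PySem.Dict.foldl_insert_getD_add_one_eq_counter]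
  set F := PySem.Dict.counter vet with hF
  have hvmap : F.keys.map (fun i => F.getD i 0) = F.values :=
    (PySem.Dict.values_eq_map_keys F (PySem.Dict.nodup_keys_counter vet) 0).symm
  rw [hvmap]
  set vals := F.values with hvals
  set g := PySem.List.sorted vals (fun x => x) with hg
  have hvals_eq : vals = (PySem.Set.ofList vet).map (fun kk => (List.count kk vet : Int)) := by
    rw [hvals, hF]
    simp only [PySem.Dict.values, PySem.Dict.items_counter, List.map_map]
    rfl
  have hvb : ∀ v ∈ vals, 1 ≤ v ∧ v ≤ (vet.length : Int) := by
    intro v hv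
    rw [hvals_eq, List.mem_map] at hv
    obtain ⟨kk, hk, rfl⟩ := hv
    rw [PySem.Set.mem_ofList] at hk
    have h1 : 0 < List.count kk vet := List.count_pos_iff.mpr hk
    have h2 : List.count kk vet ≤ vet.length := List.count_le_length
    constructor <;> [exact_mod_cast h1; exact_mod_cast h2]
  have hmem : ∀ x ∈ g, 1 ≤ x ∧ x ≤ (vet.length : Int) := by
    intro x hx
    exact hvb x ((PySem.List.mem_sorted vals (fun x => x) false x).mp hx)
  have hsorted : g.Pairwise (· ≤ ·) := by
    simpa using PySem.List.sorted_pairwise vals (fun x => x)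
  have hcnt : ∀ t : Int, (PySem.Dict.counter vals).getD t 0 = (g.count t : Int) := by
    intro t
    rw [PySem.Dict.getD_counter vals t]
    rw [(PySem.List.sorted_perm vals (fun x => x) false).count_eq t]
  have hglen : (g.length : Int) = (F.size : Int) := by
    rw [hg, PySem.List.length_sorted, hvals]
    simp [PySem.Dict.values, PySem.Dict.size]
  have hd1 : 1 ≤ (F.size : Int) := by
    obtain ⟨x, hx⟩ := List.exists_mem_of_ne_nil vet (by intro h; rw [h] at hlen0; simp at hlen0)
    have hxs : x ∈ PySem.Set.ofList vet := (PySem.Set.mem_ofList vet x).mpr hx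
    have hpos : 0 < (PySem.Set.ofList vet).length := List.length_pos_of_mem hxs
    rw [hF]
    simp only [PySem.Dict.size, PySem.Dict.items_counter, List.length_map]
    omega
  rw [foldA g k ((F.size : Int)) (by omega) hd1]
  have hcore := coreLoop (PySem.Dict.counter vals) g ((vet.length : Int)) hcnt hsorted hmem
    vet.length 1 k 0 le_rfl (by omega)
  rw [hcore]
  have hfilter : g.filter (fun x => decide (1 ≤ x)) = g :=
    List.filter_eq_self.mpr (fun x hx => by have := (hmem x hx).1; simp; omega)
  rw [hfilter]
  ring_nf
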